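-- pv_equiv track=rewrite | github.com/RAHUL-AGRAWAL04/routing-projects | bit and char stuffing/bit-stuffing_char-stuffing.py | destuffBit
-- ===== SOURCE A (Python) =====
-- def destuffBit(message):	#This function is used to destuff the stuffed bits
-- 	msg = list(message)
-- 	count = 0
-- 	i = 0
-- 	while i != len(msg):
-- 		if msg[i] == '1':
-- 			count += 1
-- 		else : count = 0
-- 		if count == 5:
-- 			msg.pop(i+1)
-- 			count = 0
-- 		i += 1
--
-- 	return (''.join(msg))
-- ===== SOURCE B (Python) =====
-- def destuffBit(message):
--     out = []
--     i = 0
--     n = len(message)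
--     count = 0
--     while i < n:
--         ch = message[i]
--         out.append(ch)
--         count = count + 1 if ch == '1' else 0
--         if count == 5:
--             i += 1  # skip the stuffed bit instead of popping it from the list
--             count = 0
--         i += 1
--     return ''.join(out)
-- ===== Notes on version B (the rewrite author's own statement) =====
-- stated objective: alternative
-- what changed: B does a single pass that appends each character to an output list and skips the stuffed bit by advancing the index, instead of A's repeated in-place list.pop(i+1) which shifts the whole tail on every stuffed bit.
-- outside the precondition, e.g. on destuffBit('11111'): A raises IndexError, B returns '11111'
import Mathlib
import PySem

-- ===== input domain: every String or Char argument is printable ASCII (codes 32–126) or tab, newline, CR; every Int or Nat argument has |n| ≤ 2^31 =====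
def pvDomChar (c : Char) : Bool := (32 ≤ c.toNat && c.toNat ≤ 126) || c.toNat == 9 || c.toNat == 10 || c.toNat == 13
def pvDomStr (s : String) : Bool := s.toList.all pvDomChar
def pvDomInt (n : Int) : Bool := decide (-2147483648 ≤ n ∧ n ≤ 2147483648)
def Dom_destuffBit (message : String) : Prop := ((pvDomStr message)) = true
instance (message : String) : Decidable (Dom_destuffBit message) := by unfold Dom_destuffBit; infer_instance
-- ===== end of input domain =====

-- B builds the output in one pass over the unchanged input, skipping the stuffed bit by
-- advancing the index, instead of A's in-place list.pop that shifts the tail each time.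

-- ===== PORT A =====
-- A's while loop over the mutable list `msg` with state (count, i); `count` updated
-- before the `count == 5` test is written inline; msg.pop(i+1) is PySem.List.pop?
-- (none = IndexError, excluded by Pre_; the port bails out with the current list there,
-- a value never claimed about).
def loopA (msg : List Char) (count i : Nat) : List Char :=
  if i = msg.length then msg
  else if h : i < msg.length then
    if (if msg[i]'h = '1' then count + 1 else 0) = 5 then
      match hp : PySem.List.pop? msg ((i : Int) + 1) with
      | none => msg          -- Python raises IndexError here (outside Pre_)
      | some (_, msg') => loopA msg' 0 (i + 1)
    else loopA msg (if msg[i]'h = '1' then count + 1 else 0) (i + 1)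
  else msg                   -- unreachable: i never exceeds msg.length
termination_by msg.length - i
decreasing_by
  · have := PySem.List.length_of_pop?_eq_some msg hp
    simp only [] at this
    omega
  · omega

def destuffBit (message : String) : String :=
  String.mk (loopA message.toList 0 0)

-- ===== PORT B =====
-- Source B's while loop: index i over the unchanged input, output accumulator `out`,
-- skipping the stuffed bit with i += 2.
def loopB (msg : List Char) (n : Nat) (out : List Char) (count i : Nat) : List Char :=
  if i < n then
    if (if msg.getD i ' ' = '1' then count + 1 else 0) = 5 then
      loopB msg n (out ++ [msg.getD i ' ']) 0 (i + 2)
    else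
      loopB msg n (out ++ [msg.getD i ' ']) (if msg.getD i ' ' = '1' then count + 1 else 0) (i + 1)
  else out
termination_by n - i
decreasing_by all_goals omega

def destuffBit_alt (message : String) : String :=
  String.mk (loopB message.toList message.toList.length [] 0 0)

-- ===== PRECONDITION & SPEC =====
-- Pre_ excludes exactly the messages on which A raises IndexError: those whose
-- de-stuffing scan finds a fifth consecutive '1' at the very last character, so that
-- msg.pop(i+1) is out of range.  scanOk checks this by pattern: whenever five '1's
-- start at a reset point, some stuffed character must follow them.
def scanOk : List Char → Bool
  | '1' :: '1' :: '1' :: '1' :: '1' :: [] => false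
  | '1' :: '1' :: '1' :: '1' :: '1' :: _ :: rest' => scanOk rest'
  | _ :: rest => scanOk rest
  | [] => true

def Pre_destuffBit (message : String) : Prop := scanOk message.toList = true
instance (message : String) : Decidable (Pre_destuffBit message) := by
  unfold Pre_destuffBit; infer_instance

def pvWitness_destuffBit : String := "0111110111"

def Spec_destuffBit (message : String) (out : String) : Prop := out = destuffBit_alt message
instance (message : String) (out : String) : Decidable (Spec_destuffBit message out) := by
  unfold Spec_destuffBit; infer_instance

-- ===== CLAIM (what is proved, stated in full; the proofs are below) =====
def Claim_equal_destuffBit : Prop :=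
  ∀ (message : String), Dom_destuffBit message → Pre_destuffBit message →
    Spec_destuffBit message (destuffBit message)

-- ===== LEMMAS AND PROOFS =====

-- reference de-stuffing scan, structural on the remaining input; used only by the proofs
def ref : List Char → Nat → List Char
  | [], _ => []
  | [c], _ => [c]
  | c :: d :: rest, count =>
    if (if c = '1' then count + 1 else 0) = 5 then c :: ref rest 0
    else c :: ref (d :: rest) (if c = '1' then count + 1 else 0)

-- counter form of scanOk, parallel to ref (false = the scan runs past the end)
def scanFrom : List Char → Nat → Bool
  | [], _ => true
  | [c], count => if (if c = '1' then count + 1 else 0) = 5 then false else true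
  | c :: d :: rest, count =>
    if (if c = '1' then count + 1 else 0) = 5 then scanFrom rest 0
    else scanFrom (d :: rest) (if c = '1' then count + 1 else 0)

theorem scanOk_rep_cons_ne (ch : Char) (h : ¬ ch = '1') (c : Nat) (hc : c ≤ 4)
    (t : List Char) : scanOk (List.replicate c '1' ++ ch :: t) = scanOk t := by
  interval_cases c <;> simp [List.replicate, scanOk, h]

theorem scanOk_replicate (c : Nat) (hc : c ≤ 4) : scanOk (List.replicate c '1') = true := by
  interval_cases c <;> decide

theorem scanOk_eq_scanFrom (n : Nat) :
    ∀ (l : List Char), l.length ≤ n → ∀ (c : Nat), c ≤ 4 →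
      scanOk (List.replicate c '1' ++ l) = scanFrom l c := by
  induction n with
  | zero =>
    intro l hl c hc
    have hnil : l = [] := List.eq_nil_of_length_eq_zero (Nat.le_zero.mp hl)
    subst hnil
    simp [scanFrom, scanOk_replicate c hc]
  | succ n ih =>
    intro l hl c hc
    cases l with
    | nil => simp [scanFrom, scanOk_replicate c hc]
    | cons ch t =>
      simp only [List.length_cons] at hl
      by_cases h1 : ch = '1'
      · subst h1
        by_cases h4 : c = 4
        · subst h4
          have hl5 : List.replicate 4 '1' ++ '1' :: t = '1'::'1'::'1'::'1'::'1'::t := rfl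
          rw [hl5]
          cases t with
          | nil => rfl
          | cons d t' =>
            have hA : scanOk ('1'::'1'::'1'::'1'::'1'::d::t') = scanOk t' := rfl
            have hB : scanFrom ('1' :: d :: t') 4 = scanFrom t' 0 := by
              simp [scanFrom]
            rw [hA, hB]
            have := ih t' (by simp only [List.length_cons] at hl; omega) 0 (by omega)
            simpa using this
        · have hstep : List.replicate c '1' ++ '1' :: t = List.replicate (c+1) '1' ++ t := by
            rw [List.replicate_succ' (n := c)]; simp
          rw [hstep]
          have hne5 : ¬ (c + 1 = 5) := by omega
          have hscan : scanFrom ('1' :: t) c = scanFrom t (c+1) := by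
            cases t with
            | nil => simp [scanFrom, hne5]
            | cons d t' => simp [scanFrom, hne5]
          rw [hscan]
          exact ih t (by omega) (c+1) (by omega)
      · rw [scanOk_rep_cons_ne ch h1 c hc t]
        have hscan : scanFrom (ch :: t) c = scanFrom t 0 := by
          cases t with
          | nil => simp [scanFrom, h1]
          | cons d t' => simp [scanFrom, h1]
        rw [hscan]
        have := ih t (by omega) 0 (by omega)
        simpa using this

-- B's loop computes the reference scan
theorem loopB_eq_ref (msg : List Char) (k : Nat) :
    ∀ (i count : Nat) (out : List Char), msg.length - i ≤ k →
      loopB msg msg.length out count i = out ++ ref (msg.drop i) count := by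
  induction k with
  | zero =>
    intro i count out hk
    rw [loopB]
    have hni : ¬ i < msg.length := by omega
    rw [List.drop_eq_nil_of_le (by omega)]
    simp [hni, ref]
  | succ k ih =>
    intro i count out hk
    rw [loopB]
    by_cases hi : i < msg.length
    · have hget : msg.getD i ' ' = msg[i] := List.getD_eq_getElem msg ' ' hi
      have hdrop := List.drop_eq_getElem_cons hi
      simp only [hi, if_true, hget]
      rw [hdrop]
      cases hdd : msg.drop (i+1) with
      | nil =>
        have hlen : msg.length ≤ i + 1 := by
          by_contra hcon
          rw [List.drop_eq_getElem_cons (by omega : i + 1 < msg.length)] at hdd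
          cases hdd
        by_cases h5 : (if msg[i] = '1' then count + 1 else 0) = 5
        · rw [if_pos h5, ih (i+2) 0 (out ++ [msg[i]]) (by omega)]
          rw [List.drop_eq_nil_of_le (by omega : msg.length ≤ i + 2)]
          simp [ref]
        · rw [if_neg h5, ih (i+1) (if msg[i] = '1' then count + 1 else 0)
              (out ++ [msg[i]]) (by omega), hdd]
          simp [ref]
      | cons d rest' =>
        have hrest : msg.drop (i+2) = rest' := by
          have h2 : msg.drop (i+2) = (msg.drop (i+1)).drop 1 := by rw [List.drop_drop]
          rw [h2, hdd]; rfl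
        by_cases h5 : (if msg[i] = '1' then count + 1 else 0) = 5
        · rw [if_pos h5, ih (i+2) 0 (out ++ [msg[i]]) (by omega), hrest]
          simp [ref, h5]
        · rw [if_neg h5, ih (i+1) (if msg[i] = '1' then count + 1 else 0)
              (out ++ [msg[i]]) (by omega), hdd]
          simp [ref, h5]
    · rw [List.drop_eq_nil_of_le (by omega)]
      simp [hi, ref]

-- A's loop computes the reference scan wherever the scan stays in range
theorem loopA_eq_ref (k : Nat) :
    ∀ (rest : List Char), rest.length ≤ k →
      ∀ (pre : List Char) (count : Nat), count ≤ 4 → scanFrom rest count = true →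
        loopA (pre ++ rest) count pre.length = pre ++ ref rest count := by
  induction k with
  | zero =>
    intro rest hk pre count _ _
    have hnil : rest = [] := List.eq_nil_of_length_eq_zero (Nat.le_zero.mp hk)
    subst hnil
    rw [loopA]
    simp [ref]
  | succ k ih =>
    intro rest hk pre count hc hs
    cases rest with
    | nil =>
      rw [loopA]; simp [ref]
    | cons c rs =>
      simp only [List.length_cons] at hk
      rw [loopA]
      have hne : ¬ pre.length = (pre ++ c :: rs).length := by simp
      have hlt : pre.length < (pre ++ c :: rs).length := by simp
      rw [if_neg hne, dif_pos hlt]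
      have hget : (pre ++ c :: rs)[pre.length]'hlt = c := by
        rw [List.getElem_append_right (by omega)]
        simp
      rw [hget]
      cases rs with
      | nil =>
        have h5 : ¬ (if c = '1' then count + 1 else 0) = 5 := by
          intro h5
          rw [show scanFrom [c] count =
                (if (if c = '1' then count + 1 else 0) = 5 then false else true) from rfl,
              if_pos h5] at hs
          exact Bool.false_ne_true hs
        rw [if_neg h5]
        have hIH := ih [] (by simp) (pre ++ [c]) (if c = '1' then count + 1 else 0)
          (by by_cases h1 : c = '1' <;> simp [h1] at h5 ⊢ <;> omega) (by simp [scanFrom])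
        simp only [List.append_assoc, List.cons_append, List.nil_append, List.append_nil, Nat.zero_add,
          List.length_append, List.length_cons, List.length_nil] at hIH
        rw [hIH]
        simp [ref]
      | cons d rs' =>
        simp only [List.length_cons] at hk
        by_cases h5 : (if c = '1' then count + 1 else 0) = 5
        · rw [if_pos h5]
          have hpop : PySem.List.pop? (pre ++ c :: d :: rs') ((pre.length : Int) + 1) =
              some (d, pre ++ c :: rs') := by
            have hcast : ((pre.length : Int) + 1) = ((pre.length + 1 : Nat) : Int) := by
              push_cast; ring
            rw [hcast, PySem.List.pop?_natCast _ _ (by simp)]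
            have hval : (pre ++ c :: d :: rs')[pre.length + 1]'(by simp) = d := by
              rw [List.getElem_append_right (by omega)]
              simp
            have herase : (pre ++ c :: d :: rs').eraseIdx (pre.length + 1) =
                pre ++ c :: rs' := by
              rw [List.eraseIdx_append_of_length_le (by omega)]
              simp [List.eraseIdx]
            rw [hval, herase]
          rw [hpop]
          show loopA (pre ++ c :: rs') 0 (pre.length + 1) = pre ++ ref (c :: d :: rs') count
          have hs' : scanFrom rs' 0 = true := by
            rw [show scanFrom (c :: d :: rs') count =
                  (if (if c = '1' then count + 1 else 0) = 5 then scanFrom rs' 0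
                   else scanFrom (d :: rs') (if c = '1' then count + 1 else 0)) from rfl,
                if_pos h5] at hs
            exact hs
          have hIH := ih rs' (by omega) (pre ++ [c]) 0 (by omega) hs'
          simp only [List.append_assoc, List.cons_append, List.nil_append, Nat.zero_add,
            List.length_append, List.length_cons, List.length_nil] at hIH
          rw [hIH]
          simp [ref, h5]
        · rw [if_neg h5]
          have hc' : (if c = '1' then count + 1 else 0) ≤ 4 := by
            by_cases h1 : c = '1' <;> simp [h1] at h5 ⊢ <;> omega
          have hs' : scanFrom (d :: rs') (if c = '1' then count + 1 else 0) = true := by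
            rw [show scanFrom (c :: d :: rs') count =
                  (if (if c = '1' then count + 1 else 0) = 5 then scanFrom rs' 0
                   else scanFrom (d :: rs') (if c = '1' then count + 1 else 0)) from rfl,
                if_neg h5] at hs
            exact hs
          have hIH := ih (d :: rs') (by simp only [List.length_cons]; omega) (pre ++ [c]) _ hc' hs'
          simp only [List.append_assoc, List.cons_append, List.nil_append, Nat.zero_add,
            List.length_append, List.length_cons, List.length_nil] at hIH
          rw [hIH]
          simp [ref, h5]

theorem alt_eq_ref (message : String) :
    destuffBit_alt message = String.mk (ref message.toList 0) := by
  unfold destuffBit_alt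
  rw [loopB_eq_ref message.toList message.toList.length 0 0 [] (by omega)]
  simp

-- ===== VERDICT (by name: the statement is the Claim_ definition above) =====
theorem destuffBit_spec : Claim_equal_destuffBit := by
  intro message _ hpre
  unfold Spec_destuffBit destuffBit
  rw [alt_eq_ref]
  have hsf : scanFrom message.toList 0 = true := by
    have h0 := scanOk_eq_scanFrom message.toList.length message.toList (le_refl _) 0 (by omega)
    simp only [List.replicate, List.nil_append] at h0
    rw [← h0]
    exact hpre
  have hA := loopA_eq_ref message.toList.length message.toList (le_refl _) [] 0 (by omega) hsf
  simp only [List.nil_append, List.length_nil] at hA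
  rw [hA]
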